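-- pv_equiv track=rewrite | github.com/SoniciSika/Artifact-of-Assertion-ICSE22 | Retrieval/AdaptionUtil.py | getNewList
-- ===== SOURCE A (Python) =====
-- def getNewList(contentL,startP,endP):
--     tempList = contentL[startP:endP]
--     z = 0
--     if endP-startP==3:
--         return tempList
--     else:
--         for l in tempList:
--             if l==',':
--                 z+=1
--     newList = []
--     if z==0:
--         for l in tempList:
--             if l == ')':
--                 newList.append("var")
--                 newList.append(")")
--             else:
--                 newList.append(l)
--     else:
--         isHavePara=False
--         for l in tempList:
--             if l == ',':
--                 isHavePara=True
--                 newList.append("var")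
--                 newList.append(",")
--             elif l==')':
--                 if isHavePara:
--                     newList.append("var")
--                 newList.append(")")
--             else:
--                 newList.append(l)
--     return newList
-- ===== SOURCE B (Python) =====
-- def getNewList(contentL, startP, endP):
--     tempList = contentL[startP:endP]
--     if endP - startP == 3:
--         return tempList
--     cut = tempList.index(',') if ',' in tempList else 0
--     return tempList[:cut] + [t for l in tempList[cut:]
--                              for t in (['var', l] if l in (',', ')') else [l])]
-- ===== Notes on version B (the rewrite author's own statement) =====
-- stated objective: simpler
-- what changed: Replaces A's comma-count plus two stateful build loops by splitting at the first comma and flat-mapping a single stateless token expansion over the suffix (prefix kept verbatim); no seen flag, no per-branch loops.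
import Mathlib
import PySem

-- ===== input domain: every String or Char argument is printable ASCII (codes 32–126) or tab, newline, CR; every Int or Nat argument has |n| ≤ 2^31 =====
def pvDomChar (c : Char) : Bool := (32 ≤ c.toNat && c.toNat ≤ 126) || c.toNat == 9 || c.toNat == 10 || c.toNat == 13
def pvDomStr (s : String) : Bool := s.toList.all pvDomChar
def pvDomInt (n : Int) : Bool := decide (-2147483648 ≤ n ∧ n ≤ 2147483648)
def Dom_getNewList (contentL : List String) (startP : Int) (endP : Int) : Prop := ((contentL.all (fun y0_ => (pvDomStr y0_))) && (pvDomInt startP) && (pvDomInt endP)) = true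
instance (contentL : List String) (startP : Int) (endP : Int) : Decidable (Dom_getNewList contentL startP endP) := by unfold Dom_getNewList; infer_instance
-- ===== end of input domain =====

-- B: split the slice at the first comma and flat-map a stateless token expansion over the suffix (prefix verbatim), instead of A's count pass plus two stateful build loops; same cost, simpler.
-- ===== PORT A =====
def getNewList (contentL : List String) (startP : Int) (endP : Int) : List String :=
  let tempList := PySem.List.slice contentL (some startP) (some endP)
  if endP - startP = 3 then tempList
  else
    let z : Int := tempList.foldl (fun z l => if l = "," then z + 1 else z) 0
    if z = 0 then
      tempList.foldl (fun acc l => if l = ")" then acc ++ ["var", ")"] else acc ++ [l]) []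
    else
      (tempList.foldl (fun (st : List String × Bool) l =>
        if l = "," then (st.1 ++ ["var", ","], true)
        else if l = ")" then ((if st.2 then st.1 ++ ["var"] else st.1) ++ [")"], st.2)
        else (st.1 ++ [l], st.2)) ([], false)).1

-- ===== PORT B =====
def expandB (l : String) : List String := if l = "," ∨ l = ")" then ["var", l] else [l]

def getNewList_alt (contentL : List String) (startP : Int) (endP : Int) : List String :=
  let tempList := PySem.List.slice contentL (some startP) (some endP)
  if endP - startP = 3 then tempList
  else
    let cut : Nat := if tempList.contains "," then (PySem.List.index? tempList ",").getD 0 else 0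
    tempList.take cut ++ (tempList.drop cut).flatMap expandB

-- ===== PRECONDITION & SPEC =====
def Spec_getNewList (contentL : List String) (startP : Int) (endP : Int) (out : List String) : Prop := out = getNewList_alt contentL startP endP
instance (contentL : List String) (startP : Int) (endP : Int) (out : List String) : Decidable (Spec_getNewList contentL startP endP out) := by unfold Spec_getNewList; infer_instance

-- ===== CLAIM =====
def Claim_equal_getNewList : Prop := ∀ (contentL : List String) (startP : Int) (endP : Int), Dom_getNewList contentL startP endP → Spec_getNewList contentL startP endP (getNewList contentL startP endP)

-- ===== LEMMAS AND PROOFS =====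
-- A's z = 0 iff the slice contains no ","
lemma count_zero_iff (xs : List String) :
    (xs.foldl (fun z l => if l = "," then z + 1 else z) 0 : Int) = 0 ↔ ¬ "," ∈ xs := by
  have key : ∀ (ys : List String) (z : Int),
      ys.foldl (fun z l => if l = "," then z + 1 else z) z = z + (ys.count "," : Int) := by
    intro ys
    induction ys with
    | nil => intro z; simp
    | cons a t ih =>
      intro z
      by_cases h : a = ","
      · simp [h, ih]; ring
      · simp [h, ih]
  rw [key]
  simp [List.count_eq_zero]

-- no-comma branch of A is the stateless expansion
lemma loop1_eq (xs : List String) (h : ¬ "," ∈ xs) (acc : List String) :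
    xs.foldl (fun acc l => if l = ")" then acc ++ ["var", ")"] else acc ++ [l]) acc
      = acc ++ xs.flatMap expandB := by
  induction xs generalizing acc with
  | nil => simp
  | cons l t ih =>
    have hl : l ≠ "," := fun e => h (by simp [e])
    have ht : ¬ "," ∈ t := fun e => h (by simp [e])
    by_cases hp : l = ")"
    · simp [hp, expandB, ih ht]
    · simp [hp, hl, expandB, ih ht]

-- after the first comma A's stateful loop is the stateless expansion
lemma loop2_true (xs : List String) (acc : List String) :
    (xs.foldl (fun (st : List String × Bool) l =>
        if l = "," then (st.1 ++ ["var", ","], true)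
        else if l = ")" then ((if st.2 then st.1 ++ ["var"] else st.1) ++ [")"], st.2)
        else (st.1 ++ [l], st.2)) (acc, true)).1
      = acc ++ xs.flatMap expandB := by
  induction xs generalizing acc with
  | nil => simp
  | cons l t ih =>
    by_cases hc : l = ","
    · simp [hc, expandB, ih]
    · by_cases hp : l = ")"
      · simp [hp, expandB, ih]
      · simp [hc, hp, expandB, ih]

-- before the first comma A's stateful loop copies tokens verbatim, then switches to the expansion
lemma loop2_split (pre suf : List String) (hpre : ¬ "," ∈ pre) (acc : List String) :
    ((pre ++ "," :: suf).foldl (fun (st : List String × Bool) l =>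
        if l = "," then (st.1 ++ ["var", ","], true)
        else if l = ")" then ((if st.2 then st.1 ++ ["var"] else st.1) ++ [")"], st.2)
        else (st.1 ++ [l], st.2)) (acc, false)).1
      = acc ++ pre ++ ["var", ","] ++ suf.flatMap expandB := by
  induction pre generalizing acc with
  | nil => simpa using loop2_true suf (acc ++ ["var", ","])
  | cons l t ih =>
    have hl : l ≠ "," := fun e => hpre (by simp [e])
    have ht : ¬ "," ∈ t := fun e => hpre (by simp [e])
    by_cases hp : l = ")"
    · simpa [hp] using ih ht (acc ++ [")"])
    · simpa [hl, hp] using ih ht (acc ++ [l])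

-- ===== VERDICT =====
theorem getNewList_spec : Claim_equal_getNewList := by
  intro contentL startP endP _
  unfold Spec_getNewList getNewList getNewList_alt
  simp only []
  set xs := PySem.List.slice contentL (some startP) (some endP) with hxs
  by_cases h3 : endP - startP = 3
  · simp [h3]
  · simp only [if_neg h3]
    by_cases hc : "," ∈ xs
    · have hz : (xs.foldl (fun z l => if l = "," then z + 1 else z) 0 : Int) ≠ 0 := by
        simpa [count_zero_iff] using hc
      obtain ⟨k, hk⟩ := Option.isSome_iff_exists.1 ((PySem.List.index?_isSome_iff (xs := xs) (v := ",")).2 hc)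
      obtain ⟨pre, suf, hsplit, hlen, hnot⟩ := (PySem.List.index?_eq_some_iff xs "," k).1 hk
      have hcontains : xs.contains "," = true := by simpa using hc
      have htake : xs.take k = pre := by
        rw [hsplit, ← hlen]; simp
      have hdrop : xs.drop k = "," :: suf := by
        rw [hsplit, ← hlen]; simp
      simp only [if_neg hz, hcontains, if_pos, hk, Option.getD_some, htake, hdrop]
      rw [hsplit, loop2_split pre suf hnot []]
      simp [expandB]
    · have hz : (xs.foldl (fun z l => if l = "," then z + 1 else z) 0 : Int) = 0 :=
        (count_zero_iff xs).2 hc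
      have hcontains : xs.contains "," = false := by simpa using hc
      simp [hz, if_neg hc, loop1_eq xs hc []]
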